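/- GENERATED by farm/mkstatement.py from design/units.tsv (unit `arena_poison`) and the Specs of Vorbis/Spec/*.lean — do not edit.
   THE STATEMENT of the proof unit `arena_poison`: the function `arena_poison` (8 instructions) satisfies its contract,
   given the contracts of its callees. What the names mean: Vorbis/Spec/Basic.lean. The theorem to prove:
   `theorem arena_poison_ok : Vorbis.Spec.arena_poison.Statement`. -/
import Vorbis.Spec.Runtime
namespace Vorbis.Spec.arena_poison
open X86 X86.User Asan

/-- The statement of unit `arena_poison`. -/
def Statement : Prop :=
  ∀ (Lay : Layout) (_hLay : Lay.hi = 0x1000000) (μ : Microarch) (_hμ : UserX.MicroOK μ) (u₀ : State)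
    (_hcode : HasCodeNat Lay u₀ Vorbis.L.arena_poison.entry Vorbis.Code.code_arena_poison.nat Vorbis.L.arena_poison.size),
    Calls Lay μ Vorbis.WayInv (Vorbis.conv u₀) Vorbis.L.arena_poison.entry Asan.arenaPoisonSpec

end Vorbis.Spec.arena_poison
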